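-- pv_equiv track=rewrite | github.com/jproj3cts/Cyberscript | Code/Cyberscript.py | genEvil
-- ===== SOURCE A (Python) =====
-- def getParity(n):
--     parity = 0
--     while n:
--         parity = ~parity
--         n = n & (n - 1)
--     return parity
--
-- def genEvil(n):
--     c = 0
--     i = 0
--     while True:
--         if getParity(i) == 0:
--             if c == n:
--                 return i
--             c+=1
--         i+=1
-- ===== SOURCE B (Python) =====
-- def genEvil(n):
--     # nth evil number in closed form: 2n plus the parity of popcount(n)
--     return 2 * n + bin(n).count("1") % 2
-- ===== Notes on version B (the rewrite author's own statement) =====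
-- stated objective: faster
-- what changed: Replaced the linear scan that tests the bit-parity of every integer up to the result with the closed form evil(n) = 2n + (popcount(n) mod 2).
import Mathlib
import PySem

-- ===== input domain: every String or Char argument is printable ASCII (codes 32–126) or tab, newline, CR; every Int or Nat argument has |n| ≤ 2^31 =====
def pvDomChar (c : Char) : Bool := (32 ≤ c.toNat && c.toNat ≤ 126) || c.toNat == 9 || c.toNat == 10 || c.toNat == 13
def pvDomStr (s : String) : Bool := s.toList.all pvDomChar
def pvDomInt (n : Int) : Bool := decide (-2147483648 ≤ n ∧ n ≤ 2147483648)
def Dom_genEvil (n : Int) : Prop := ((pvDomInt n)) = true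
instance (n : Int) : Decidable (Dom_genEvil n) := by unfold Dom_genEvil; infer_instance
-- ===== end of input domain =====

-- B replaces A's linear scan over 0..result with the closed form evil(n) = 2n + (popcount(n) mod 2).

-- ===== PORT A =====
-- getParity: Python's `while n: parity = ~parity; n = n & (n-1)`; ~parity is -parity-1.
-- A only calls it on i ≥ 0, so the state n is a Nat; fuel n suffices since n&(n-1) < n for n > 0.
def getParityAux : Nat → Nat → Int → Int
  | 0, _, parity => parity
  | fuel+1, n, parity => if n = 0 then parity else getParityAux fuel (n &&& (n-1)) (-parity - 1)

def getParity (i : Int) : Int := getParityAux i.toNat i.toNat 0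

-- the `while True` loop of genEvil; fuel 2n+2 iterations always suffice (proved below);
-- the fuel-0 branch is unreachable under Pre_.
def genEvilAux : Nat → Int → Int → Int → Int
  | 0, _, _, i => i
  | fuel+1, n, c, i =>
    if getParity i = 0 then
      if c = n then i else genEvilAux fuel n (c+1) (i+1)
    else genEvilAux fuel n c (i+1)

def genEvil (n : Int) : Int := genEvilAux (2*n.toNat + 2) n 0 0

-- ===== PORT B =====
-- popcount = bin(n).count("1") of Source B (number of 1 bits of a nonnegative integer)
def popcount (n : Nat) : Nat :=
  if n = 0 then 0 else popcount (n / 2) + n % 2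
decreasing_by exact Nat.div_lt_self (Nat.pos_of_ne_zero (by assumption)) (by norm_num)

def genEvil_alt (n : Int) : Int := 2 * n + ((popcount n.toNat % 2 : Nat) : Int)

-- ===== PRECONDITION & SPEC =====
-- Pre_ excludes negative n, on which Python A loops forever (its nonnegative counter never equals n).
def Pre_genEvil (n : Int) : Prop := 0 ≤ n
instance (n : Int) : Decidable (Pre_genEvil n) := by unfold Pre_genEvil; infer_instance
def pvWitness_genEvil : Int := (3)

def Spec_genEvil (n : Int) (out : Int) : Prop := out = genEvil_alt n
instance (n : Int) (out : Int) : Decidable (Spec_genEvil n out) := by unfold Spec_genEvil; infer_instance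

-- ===== CLAIM (what is proved, stated in full; the proofs are below) =====
def Claim_equal_genEvil : Prop := ∀ (n : Int), Dom_genEvil n → Pre_genEvil n → Spec_genEvil n (genEvil n)

-- ===== LEMMAS AND PROOFS =====

theorem popcount_zero : popcount 0 = 0 := by rw [popcount]; simp

theorem popcount_two_mul (m : Nat) : popcount (2*m) = popcount m := by
  rcases Nat.eq_zero_or_pos m with h | h
  · subst h; rfl
  · conv_lhs => rw [popcount]
    have h0 : ¬ (2*m = 0) := by omega
    have h1 : (2*m)/2 = m := by omega
    have h2 : (2*m)%2 = 0 := by omega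
    simp [h0, h1, h2]

theorem popcount_two_mul_add_one (m : Nat) : popcount (2*m+1) = popcount m + 1 := by
  conv_lhs => rw [popcount]
  have h1 : (2*m+1)/2 = m := by omega
  have h2 : (2*m+1)%2 = 1 := by omega
  simp [h1, h2]

theorem land_odd (m : Nat) : (2*m+1) &&& (2*m) = 2*m := by
  apply Nat.eq_of_testBit_eq
  intro i
  cases i with
  | zero =>
      simp only [Nat.testBit_zero]
      have h1 : (2*m+1) % 2 = 1 := by omega
      have h2 : (2*m) % 2 = 0 := by omega
      simp [h1, h2]
  | succ j =>
      rw [Nat.testBit_and]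
      simp only [Nat.testBit_succ]
      have h1 : (2*m+1)/2 = m := by omega
      have h2 : (2*m)/2 = m := by omega
      rw [h1, h2, Bool.and_self]

theorem land_even (m : Nat) (h : 0 < m) : (2*m) &&& (2*m-1) = 2*(m &&& (m-1)) := by
  apply Nat.eq_of_testBit_eq
  intro i
  cases i with
  | zero =>
      simp only [Nat.testBit_zero]
      have h1 : (2*m) % 2 = 0 := by omega
      have h2 : (2*(m &&& (m-1))) % 2 = 0 := by omega
      simp [h1, h2]
  | succ j =>
      rw [Nat.testBit_and]
      simp only [Nat.testBit_succ]
      have h1 : (2*m)/2 = m := by omega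
      have h2 : (2*m-1)/2 = m-1 := by omega
      have h3 : (2*(m &&& (m-1)))/2 = m &&& (m-1) := by omega
      rw [h1, h2, h3, Nat.testBit_and]

-- clearing the lowest set bit flips the parity of the popcount
theorem popcount_land_pred (n : Nat) (h : 0 < n) :
    popcount (n &&& (n-1)) % 2 = (popcount n + 1) % 2 := by
  induction n using Nat.strong_induction_on with
  | _ n ih =>
    obtain ⟨m, rfl | rfl⟩ := Nat.even_or_odd' n
    · have hm : 0 < m := by omega
      rw [land_even m hm, popcount_two_mul, popcount_two_mul]
      have := ih m (by omega) hm
      omega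
    · have : (2*m+1) - 1 = 2*m := by omega
      rw [this, land_odd, popcount_two_mul, popcount_two_mul_add_one]
      omega

theorem getParityAux_spec (n : Nat) : ∀ (fuel : Nat) (p : Int), n ≤ fuel →
    getParityAux fuel n p = if popcount n % 2 = 0 then p else -p - 1 := by
  induction n using Nat.strong_induction_on with
  | _ n ih =>
    intro fuel p hf
    cases fuel with
    | zero =>
        have : n = 0 := by omega
        subst this
        simp [getParityAux, popcount_zero]
    | succ f =>
        by_cases hn : n = 0
        · subst hn; simp [getParityAux, popcount_zero]
        · have hpos : 0 < n := Nat.pos_of_ne_zero hn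
          have hlt : n &&& (n-1) < n :=
            lt_of_le_of_lt (Nat.and_le_right) (by omega)
          have hstep := ih (n &&& (n-1)) hlt f (-p - 1) (by omega)
          simp only [getParityAux, hn, if_false]
          rw [hstep, popcount_land_pred n hpos]
          by_cases hp : popcount n % 2 = 0
          · have : ¬ (popcount n + 1) % 2 = 0 := by omega
            simp [hp, this]
          · have : (popcount n + 1) % 2 = 0 := by omega
            simp [hp, this]

theorem getParity_natCast (k : Nat) :
    getParity (k : Int) = if popcount k % 2 = 0 then 0 else -1 := by
  unfold getParity
  rw [Int.toNat_natCast]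
  rw [getParityAux_spec k k 0 le_rfl]
  split <;> norm_num

-- the main loop invariant: from state (c = n - d, i = 2k) with fuel ≥ 2d+2 the scan
-- returns the d-th (0-indexed) evil number ≥ 2k, which is 2(k+d) + parity(k+d)
theorem genEvilAux_loop : ∀ (d : Nat) (n : Int) (k fuel : Nat), 2*d + 2 ≤ fuel →
    genEvilAux fuel n (n - (d : Int)) (2 * (k : Int)) =
      2 * ((k : Int) + (d : Int)) + ((popcount (k + d) % 2 : Nat) : Int) := by
  intro d
  induction d with
  | zero =>
    intro n k fuel hf
    match fuel, hf with
    | f + 2, _ =>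
      have e1 : 2 * (k : Int) = ((2*k : Nat) : Int) := by push_cast; ring
      have e2 : 2 * (k : Int) + 1 = ((2*k+1 : Nat) : Int) := by push_cast; ring
      by_cases hp : popcount k % 2 = 0
      · have hg : getParity (2 * (k : Int)) = 0 := by
          rw [e1, getParity_natCast, popcount_two_mul, if_pos hp]
        simp [genEvilAux, hg, hp]
      · have hg : getParity (2 * (k : Int)) = -1 := by
          rw [e1, getParity_natCast, popcount_two_mul, if_neg hp]
        have hp1 : (popcount k + 1) % 2 = 0 := by omega
        have hg1 : getParity (2 * (k : Int) + 1) = 0 := by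
          rw [e2, getParity_natCast, popcount_two_mul_add_one, if_pos hp1]
        have hk : popcount k % 2 = 1 := by omega
        simp [genEvilAux, hg, hg1, hk]
  | succ d ih =>
    intro n k fuel hf
    match fuel, hf with
    | f + 2, hf =>
      have hcn : ¬ (n - ((d+1 : Nat) : Int) = n) := by push_cast; omega
      have e1 : 2 * (k : Int) = ((2*k : Nat) : Int) := by push_cast; ring
      have e2 : 2 * (k : Int) + 1 = ((2*k+1 : Nat) : Int) := by push_cast; ring
      have ec : n - ((d+1 : Nat) : Int) + 1 = n - (d : Int) := by push_cast; ring
      have ei : 2 * (k : Int) + 1 + 1 = 2 * ((k+1 : Nat) : Int) := by push_cast; ring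
      have ihx := ih n (k+1) f (by omega)
      have eres : 2 * (((k+1 : Nat) : Int) + (d : Int)) + ((popcount (k + 1 + d) % 2 : Nat) : Int)
          = 2 * ((k : Int) + ((d+1 : Nat) : Int)) + ((popcount (k + (d+1)) % 2 : Nat) : Int) := by
        have h : k + 1 + d = k + (d+1) := by omega
        rw [h]; push_cast; ring
      by_cases hp : popcount k % 2 = 0
      · have hg : getParity (2 * (k : Int)) = 0 := by
          rw [e1, getParity_natCast, popcount_two_mul, if_pos hp]
        have hp1 : ¬ ((popcount k + 1) % 2 = 0) := by omega
        have hg1 : getParity (2 * (k : Int) + 1) = -1 := by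
          rw [e2, getParity_natCast, popcount_two_mul_add_one, if_neg hp1]
        have ht : (((-1 : Int)) = 0) ↔ False := by norm_num
        simp only [genEvilAux, hg, hg1, hcn, ht, ite_true, ite_false]
        rw [ec, ei, ihx, eres]
      · have hg : getParity (2 * (k : Int)) = -1 := by
          rw [e1, getParity_natCast, popcount_two_mul, if_neg hp]
        have hp1 : (popcount k + 1) % 2 = 0 := by omega
        have hg1 : getParity (2 * (k : Int) + 1) = 0 := by
          rw [e2, getParity_natCast, popcount_two_mul_add_one, if_pos hp1]
        have ht : (((-1 : Int)) = 0) ↔ False := by norm_num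
        simp only [genEvilAux, hg, hg1, hcn, ht, ite_true, ite_false]
        rw [ec, ei, ihx, eres]

-- ===== VERDICT (by name: the statement is the Claim_ definition above) =====
theorem genEvil_spec : Claim_equal_genEvil := by
  intro n _ hpre
  unfold Spec_genEvil genEvil genEvil_alt
  have hn : ((n.toNat : Nat) : Int) = n := Int.toNat_of_nonneg hpre
  have h := genEvilAux_loop n.toNat n 0 (2*n.toNat + 2) le_rfl
  simp only [hn, sub_self, Nat.cast_zero, mul_zero, zero_add] at h
  exact h
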